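-- pv_equiv track=rewrite | github.com/Tohirjon-Odilov/python | py_exam/final_exam/likes.py | txt
-- ===== SOURCE A (Python) =====
-- def txt(texts: list) -> str:
--         if texts != []:
--             words = str()
--             text_len = len(texts)
--             for i in range(text_len):
--                 if text_len < 2:
--                     words += texts[i]
--                 elif i != text_len - 1:
--                     words += texts[i]+", "
--                 else:
--                     words = words[:-2]+" and "+texts[i]
--             return words + " likes this"
--         else:
--             return "no one likes this"
-- ===== SOURCE B (Python) =====
-- def txt(texts: list) -> str:
--     if texts != []:
--         n = len(texts)
--         if n == 1:
--             body = texts[0]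
--         else:
--             body = ", ".join(texts[:-1]) + " and " + texts[-1]
--         return body + " likes this"
--     else:
--         return "no one likes this"
-- ===== Notes on version B (the rewrite author's own statement) =====
-- stated objective: simpler
-- what changed: Replaces A's index loop (per-iteration branching, repeated string concatenation and trailing-', ' trimming via words[:-2]) by a length-based split: ', '.join of all but the last element + ' and ' + the last; join avoids quadratic re-copying of the accumulator.
import Mathlib
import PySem

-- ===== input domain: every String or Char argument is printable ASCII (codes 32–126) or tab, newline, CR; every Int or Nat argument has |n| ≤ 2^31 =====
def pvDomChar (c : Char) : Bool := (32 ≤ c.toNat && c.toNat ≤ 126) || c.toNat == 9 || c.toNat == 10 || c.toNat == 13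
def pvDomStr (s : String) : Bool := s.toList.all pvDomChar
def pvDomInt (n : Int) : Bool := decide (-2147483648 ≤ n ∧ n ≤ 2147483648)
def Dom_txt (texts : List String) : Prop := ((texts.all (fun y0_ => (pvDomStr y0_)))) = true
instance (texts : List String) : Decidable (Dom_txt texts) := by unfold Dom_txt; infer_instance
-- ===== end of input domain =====

-- B replaces A's index loop (with per-iteration branching and trailing-", " trimming via words[:-2])
-- by a length-based split: ", ".join of all but the last element, " and ", the last element. Same cost, simpler.


-- ===== PORT A =====
-- strings are handled on the List Char side (String.toList / String.ofList), as PySem prescribes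
def txt (texts : List String) : String :=
  if texts ≠ [] then
    let L := texts.map String.toList
    let n : Int := PySem.List.len texts
    let words : List Char := (PySem.List.pyRange 0 n).foldl (fun words i =>
      if n < 2 then words ++ PySem.List.pyGetD L i []
      else if i ≠ n - 1 then words ++ PySem.List.pyGetD L i [] ++ ", ".toList
      else PySem.List.slice words none (some (-2)) ++ " and ".toList ++ PySem.List.pyGetD L i []) []
    String.ofList (words ++ " likes this".toList)
  else "no one likes this"

-- ===== PORT B =====
def txt_alt (texts : List String) : String :=
  if texts ≠ [] then
    let L := texts.map String.toList
    let body : List Char :=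
      if texts.length = 1 then PySem.List.pyGetD L 0 []
      else PySem.Chars.join ", ".toList (PySem.List.slice L none (some (-1)))
             ++ " and ".toList ++ PySem.List.pyGetD L (-1) []
    String.ofList (body ++ " likes this".toList)
  else "no one likes this"

-- ===== PRECONDITION & SPEC =====
def Spec_txt (texts : List String) (out : String) : Prop := out = txt_alt texts
instance (texts : List String) (out : String) : Decidable (Spec_txt texts out) := by unfold Spec_txt; infer_instance

-- ===== CLAIM (what is proved, stated in full; the proofs are below) =====
def Claim_equal_txt : Prop := ∀ (texts : List String), Dom_txt texts → Spec_txt texts (txt texts)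

-- ===== LEMMAS AND PROOFS =====

-- appending the separator to every piece and flattening = join with a trailing separator (M ≠ [])
theorem flatten_map_append_sep (s : List Char) (M : List (List Char)) (h : M ≠ []) :
    (M.map (fun l => l ++ s)).flatten = PySem.Chars.join s M ++ s := by
  induction M with
  | nil => simp at h
  | cons a M ih =>
    cases M with
    | nil => simp [PySem.Chars.join, List.intercalate]
    | cons b M' =>
      simp only [List.map_cons, List.flatten_cons] at *
      rw [ih (by simp)]
      simp only [PySem.Chars.join]
      simp [List.intercalate, List.intersperse]

theorem pyGetD_neg_one_eq_last {α : Type} (L : List α) (d : α) (h : L ≠ []) :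
    PySem.List.pyGetD L (-1) d = PySem.List.pyGetD L ((L.length : Int) - 1) d := by
  have h1 : 1 ≤ L.length := List.length_pos_of_ne_nil h
  simp [PySem.List.pyGetD, PySem.List.pyGet?, PySem.List.pyIdx?, h1]

theorem txt_equal_aux : ∀ (texts : List String), txt texts = txt_alt texts := by
  intro texts
  by_cases hne : texts = []
  · subst hne; rfl
  · unfold txt txt_alt
    simp only [if_pos hne]
    rw [show PySem.List.len texts = ((texts.length : Int)) from by simp [PySem.List.len]]
    set L := texts.map String.toList with hL
    have hLlen : L.length = texts.length := by simp [hL]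
    have hLne : L ≠ [] := by
      intro h; apply hne; simpa [hL] using congrArg List.length h
    by_cases h1 : texts.length = 1
    · -- single element: A's loop runs once through the n < 2 branch
      have hr : PySem.List.pyRange 0 (1 : Int) = [0] := by decide
      simp only [h1, Nat.cast_one, hr, List.foldl_cons, List.foldl_nil, if_pos]
      simp
    · -- length ≥ 2
      have h2 : 2 ≤ texts.length := by
        rcases texts with _ | ⟨a, t⟩
        · exact absurd rfl hne
        · rcases t with _ | _ <;> simp_all
      set n : Int := (texts.length : Int) with hn
      have hn2 : 2 ≤ n := by rw [hn]; exact_mod_cast h2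
      set f : List Char → Int → List Char := fun words i =>
        if n < 2 then words ++ PySem.List.pyGetD L i []
        else if i ≠ n - 1 then words ++ PySem.List.pyGetD L i [] ++ ", ".toList
        else PySem.List.slice words none (some (-2)) ++ " and ".toList ++ PySem.List.pyGetD L i []
        with hf
      -- split off the last iteration
      have hsplit : PySem.List.pyRange 0 n = PySem.List.pyRange 0 (n - 1) ++ [n - 1] := by
        have e := PySem.List.pyRange_one_succ_right (a := 0) (b := n - 1) (by omega)
        rw [show (n - 1) + 1 = n by ring] at e
        exact e
      -- the indexed map over the first n-1 indices is L.dropLast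
      have hmap : (PySem.List.pyRange 0 (n - 1)).map (fun i => PySem.List.pyGetD L i []) = L.dropLast := by
        have hlen' : PySem.List.len L.dropLast = n - 1 := by
          simp [PySem.List.len, hLlen]; omega
        calc (PySem.List.pyRange 0 (n - 1)).map (fun i => PySem.List.pyGetD L i [])
            = (PySem.List.pyRange 0 (n - 1)).map (fun i => PySem.List.pyGetD L.dropLast i []) := by
              apply List.map_congr_left
              intro j hj
              rw [PySem.List.mem_pyRange_one] at hj
              have hj1 : j < (L.dropLast.length : Int) := by
                simp only [List.length_dropLast, hLlen]; omega
              rw [PySem.List.pyGetD_eq_getElem L [] hj.1 (by simp [hLlen]; omega),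
                  PySem.List.pyGetD_eq_getElem L.dropLast [] hj.1 hj1,
                  List.getElem_dropLast]
          _ = L.dropLast := by rw [← hlen']; exact PySem.List.map_pyGetD_pyRange_zero _ _
      have hdne : L.dropLast ≠ [] := by
        intro hdn
        have := congrArg List.length hdn
        simp [hLlen] at this; omega
      -- the prefix loop builds the join plus a trailing ", "
      have hpref : (PySem.List.pyRange 0 (n - 1)).foldl f []
          = PySem.Chars.join ", ".toList L.dropLast ++ ", ".toList := by
        rw [PySem.List.foldl_congr_mem _ f
              (fun w i => w ++ (PySem.List.pyGetD L i [] ++ ", ".toList)) []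
              (by
                intro acc x hx
                rw [PySem.List.mem_pyRange_one] at hx
                simp only [hf]
                rw [if_neg (by omega), if_pos (by omega)]
                simp),
            PySem.List.foldl_append_eq_flatMap, List.flatMap_def,
            show (fun i => PySem.List.pyGetD L i [] ++ ", ".toList)
              = (fun l => l ++ ", ".toList) ∘ (fun i => PySem.List.pyGetD L i []) from rfl,
            ← List.map_map, hmap, flatten_map_append_sep _ _ hdne]
        simp
      -- last iteration: the else branch, slice trims the trailing ", "
      rw [hsplit, List.foldl_append, hpref, List.foldl_cons, List.foldl_nil, hf]
      beta_reduce
      rw [if_neg (by omega), if_neg (by omega : ¬ (n - 1) ≠ n - 1)]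
      have hJ : PySem.List.slice (PySem.Chars.join ", ".toList L.dropLast ++ ", ".toList)
            none (some (-2)) = PySem.Chars.join ", ".toList L.dropLast := by
        rw [PySem.List.slice_to_neg_ofNat _ 2 (by omega)]
        have : (PySem.Chars.join ", ".toList L.dropLast ++ ", ".toList).length - 2
            = (PySem.Chars.join ", ".toList L.dropLast).length := by
          rw [List.length_append, show (", ".toList).length = 2 from by decide]
          omega
        rw [this, List.take_left]
      rw [hJ, PySem.List.slice_to_neg_one, pyGetD_neg_one_eq_last L [] hLne, hLlen,
          ← hn, if_neg h1]

-- ===== VERDICT (by name: the statement is the Claim_ definition above) =====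
theorem txt_spec : Claim_equal_txt := by
  intro texts _
  exact txt_equal_aux texts
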